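-- pv_equiv track=rewrite | github.com/oskarioskari/python-stuff | Solutions_to_exercises/alkulukujen_summa.py | summia
-- ===== SOURCE A (Python) =====
-- def summia(luku,lista):
-- 	if sum(lista) > luku:
-- 		return(0)
-- 	elif sum(lista) == luku:
-- 		return(1)
-- 	else:
-- 		tulos = 0
-- 		for j in range(luku,1,-1):
-- 			uusi = []
-- 			for item in lista:
-- 				uusi.append(item)
-- 			jaollinen = False
-- 			for k in range(j-1,1,-1):
-- 				if j%k == 0:
-- 					jaollinen = True
-- 			if jaollinen == False:
-- 				uusi.append(j)
-- 				tulos += summia(luku,uusi)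
-- 		return(tulos)
-- ===== SOURCE B (Python) =====
-- def summia(luku, lista):
--     # Count ordered compositions of luku - sum(lista) into primes <= luku,
--     # by a bottom-up DP table instead of A's exponential recursion.
--     remaining = luku - sum(lista)
--     if remaining < 0:
--         return 0
--     if remaining == 0:
--         return 1
--     limit = min(luku, remaining)
--     primes = [p for p in range(2, limit + 1)
--               if all(p % d != 0 for d in range(2, p))]
--     if not primes:
--         return 0
--     dp = [1]
--     for i in range(1, remaining + 1):
--         dp.append(sum(dp[i - p] for p in primes if p <= i))
--     return dp[remaining]
-- ===== Notes on version B (the rewrite author's own statement) =====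
-- stated objective: alternative
-- what changed: Replaces A's exponential top-down recursion (which re-tests primality of every j from scratch in every call) with a prime list computed once plus a bottom-up dynamic-programming table over the remaining target, counting ordered prime compositions of luku - sum(lista); it trades A's recursion for a table of size luku - sum(lista), which itself grows large when sum(lista) is very negative.
import Mathlib
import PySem

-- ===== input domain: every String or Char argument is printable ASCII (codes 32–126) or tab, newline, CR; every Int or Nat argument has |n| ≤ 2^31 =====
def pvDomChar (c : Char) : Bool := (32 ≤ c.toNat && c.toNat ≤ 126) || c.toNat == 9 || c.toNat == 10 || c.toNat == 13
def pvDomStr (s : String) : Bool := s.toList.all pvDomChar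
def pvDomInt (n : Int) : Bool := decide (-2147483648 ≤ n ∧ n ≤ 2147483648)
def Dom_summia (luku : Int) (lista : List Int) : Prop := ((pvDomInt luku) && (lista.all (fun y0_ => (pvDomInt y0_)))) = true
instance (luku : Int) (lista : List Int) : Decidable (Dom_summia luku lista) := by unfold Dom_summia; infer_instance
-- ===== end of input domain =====

-- B replaces A's recursive search by a one-pass prime list plus a bottom-up DP table
-- over the remaining target (counting ordered prime compositions); objective: alternative.

-- ===== PORT A =====
-- A is mutually recursive with its own 'for j in range(luku,1,-1)' loop; the loop helper
-- carries two proof arguments used only for termination (they do not affect the value).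
mutual
def summia (luku : Int) (lista : List Int) : Int :=
  if _h1 : lista.sum > luku then 0
  else if _h2 : lista.sum = luku then 1
  else
    summiaLoop luku lista (PySem.List.pyRange luku 1 (-1)) 0
      (fun j hj => ((PySem.List.mem_pyRange_neg_one).1 hj).1)
      (by omega)
termination_by ((luku - lista.sum).toNat, luku.toNat + 1)
decreasing_by
  apply Prod.Lex.right
  have := PySem.List.length_pyRange_neg_one luku 1
  omega

def summiaLoop (luku : Int) (lista : List Int) (js : List Int) (tulos : Int)
    (hj : ∀ j ∈ js, 1 < j) (hs : lista.sum < luku) : Int :=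
  match js with
  | [] => tulos
  | j :: rest =>
    let uusi := lista.foldl (fun acc item => acc ++ [item]) []
    let jaollinen := (PySem.List.pyRange (j-1) 1 (-1)).foldl
        (fun b k => if PySem.Int.mod j k == 0 then true else b) false
    let tulos' := if jaollinen = false then tulos + summia luku (uusi ++ [j]) else tulos
    summiaLoop luku lista rest tulos' (fun x hx => hj x (List.mem_cons_of_mem _ hx)) hs
termination_by ((luku - lista.sum).toNat, js.length)
decreasing_by
· apply Prod.Lex.left
  have hu : lista.foldl (fun acc item => acc ++ [item]) [] = lista := by
    simpa using PySem.List.foldl_append_singleton lista ([] : List Int)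
  have hj2 : 1 < j := hj j (List.mem_cons_self ..)
  rw [hu, List.sum_append, List.sum_cons, List.sum_nil]
  omega
· apply Prod.Lex.right
  simp
end

-- ===== PORT B =====
def summia_alt (luku : Int) (lista : List Int) : Int :=
  let remaining := luku - lista.sum
  if remaining < 0 then 0
  else if remaining = 0 then 1
  else
    let limit := min luku remaining
    let primes := (PySem.List.pyRange 2 (limit+1) 1).filter
        (fun p => (PySem.List.pyRange 2 p 1).all (fun d => !(PySem.Int.mod p d == 0)))
    if primes = [] then 0
    else
      let dp := (PySem.List.pyRange 1 (remaining+1) 1).foldl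
          (fun dp i => dp ++ [((primes.filter (fun p => decide (p ≤ i))).map
              (fun p => PySem.List.pyGetD dp (i - p) 0)).sum]) [1]
      PySem.List.pyGetD dp remaining 0

-- ===== PRECONDITION & SPEC =====
-- Pre_ excludes exactly the inputs on which Python A raises RecursionError instead of
-- returning: for luku >= 2 the search descends a chain of 2-summands whose depth is
-- determined by remaining = luku - sum(lista) alone, and under the test harness's
-- recursion limit (10000) A raises precisely when luku >= 2 and remaining >= 19995
-- (measured: A returns at 19994 and raises at 19995 for every luku >= 2).
def Pre_summia (luku : Int) (lista : List Int) : Prop := luku < 2 ∨ luku - lista.sum < 19995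
instance (luku : Int) (lista : List Int) : Decidable (Pre_summia luku lista) := by unfold Pre_summia; infer_instance
def pvWitness_summia : Int × List Int := (10, [])

def Spec_summia (luku : Int) (lista : List Int) (out : Int) : Prop := out = summia_alt luku lista
instance (luku : Int) (lista : List Int) (out : Int) : Decidable (Spec_summia luku lista out) := by unfold Spec_summia; infer_instance

-- ===== CLAIM (what is proved, stated in full; the proofs are below) =====
def Claim_equal_summia : Prop := ∀ (luku : Int) (lista : List Int), Dom_summia luku lista → Pre_summia luku lista → Spec_summia luku lista (summia luku lista)

-- ===== LEMMAS AND PROOFS =====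

-- B's primality test as a predicate (B's filter lambda verbatim).
def isPr (p : Int) : Bool := (PySem.List.pyRange 2 p 1).all (fun d => !(PySem.Int.mod p d == 0))

-- The primes ≤ L in increasing order.
def P (L : Int) : List Int := (PySem.List.pyRange 2 (L+1) 1).filter isPr

-- The DP table of length n+1, entry k = number of ordered compositions of k into parts from `primes`.
def dpVec (primes : List Int) : Nat → List Int
  | 0 => [1]
  | Nat.succ n =>
      let d := dpVec primes n
      d ++ [((primes.filter (fun p => decide (p ≤ ((n : Int)+1)))).map
              (fun p => PySem.List.pyGetD d (((n : Int)+1) - p) 0)).sum]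

def cDP (primes : List Int) (k : Nat) : Int := (dpVec primes k).getD k 0

def gP (primes : List Int) (r : Int) : Int := if r < 0 then 0 else cDP primes r.toNat

lemma length_dpVec (primes : List Int) (n : Nat) : (dpVec primes n).length = n + 1 := by
  induction n with
  | zero => rfl
  | succ n ih => simp [dpVec, ih]

lemma getD_dpVec (primes : List Int) (n k : Nat) (hk : k ≤ n) :
    (dpVec primes n).getD k 0 = cDP primes k := by
  induction n with
  | zero =>
    have : k = 0 := by omega
    subst this; rfl
  | succ n ih =>
    rcases Nat.lt_or_ge k (n+1) with h | h
    · rw [dpVec]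
      rw [List.getD_append _ _ _ _ (by rw [length_dpVec]; omega)]
      exact ih (by omega)
    · have : k = n + 1 := by omega
      subst this; rfl

lemma c_zero (primes : List Int) : cDP primes 0 = 1 := rfl

lemma c_succ (primes : List Int) (hp : ∀ p ∈ primes, 2 ≤ p) (n : Nat) :
    cDP primes (n+1) =
      ((primes.filter (fun p => decide (p ≤ ((n : Int)+1)))).map
        (fun p => gP primes (((n : Int)+1) - p))).sum := by
  unfold cDP
  rw [dpVec]
  rw [List.getD_append_right _ _ _ _ (by rw [length_dpVec])]
  rw [length_dpVec]
  simp only [Nat.sub_self, List.getD_cons_zero]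
  congr 1
  apply List.map_congr_left
  intro p hmem
  have hple : p ≤ (n : Int) + 1 := by
    have := (List.mem_filter.1 hmem).2
    simpa using this
  have hp2 : 2 ≤ p := hp p (List.mem_filter.1 hmem).1
  have hidx : ((n : Int) + 1) - p = ((n + 1 - p.toNat : Nat) : Int) := by omega
  rw [hidx, PySem.List.pyGetD_natCast,
      getD_dpVec primes n (n + 1 - p.toNat) (by omega)]
  unfold gP
  rw [if_neg (by omega)]
  simp

-- sum of an ite-sum equals sum over the filter
lemma sum_map_ite_zero {α : Type} (l : List α) (p : α → Bool) (f : α → Int) :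
    (l.map (fun x => if p x then f x else 0)).sum = ((l.filter p).map f).sum := by
  induction l with
  | nil => rfl
  | cons x t ih => by_cases h : p x <;> simp [h, ih]

-- dropping summands that are 0
lemma sum_map_eq_filter {α : Type} (l : List α) (p : α → Bool) (f : α → Int)
    (h : ∀ x ∈ l, p x = false → f x = 0) :
    (l.map f).sum = ((l.filter p).map f).sum := by
  induction l with
  | nil => rfl
  | cons x t ih =>
    by_cases hx : p x <;>
      simp [hx, ih (fun y hy => h y (List.mem_cons_of_mem _ hy)),
            h x (List.mem_cons_self ..)]

lemma two_le_mem_P (L : Int) (p : Int) (hp : p ∈ P L) : 2 ≤ p := by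
  have := (List.mem_filter.1 hp).1
  exact (PySem.List.mem_pyRange_one.1 this).1

-- unfiltered recurrence for gP
lemma gP_succ (primes : List Int) (hp : ∀ p ∈ primes, 2 ≤ p) (r : Int) (hr : 0 < r) :
    gP primes r = (primes.map (fun p => gP primes (r - p))).sum := by
  obtain ⟨n, hn⟩ : ∃ n : Nat, r = (n : Int) + 1 := ⟨r.toNat - 1, by omega⟩
  subst hn
  have hL : gP primes ((n : Int) + 1) = cDP primes (n + 1) := by
    unfold gP
    rw [if_neg (by omega)]
    congr 1
  rw [hL, c_succ primes hp n,
      sum_map_eq_filter primes (fun p => decide (p ≤ (n : Int) + 1))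
        (fun p => gP primes ((n : Int) + 1 - p))
        (fun p _ hfalse => by
          simp only [gP]
          rw [if_pos (by simpa using hfalse)])]

-- A's loop computes 'tulos + Σ_{j ∈ js, isPr j} summia luku (lista ++ [j])'
lemma jaollinen_eq (j : Int) :
    (PySem.List.pyRange (j-1) 1 (-1)).foldl (fun b k => if PySem.Int.mod j k == 0 then true else b) false = !isPr j := by
  rw [PySem.List.foldl_if_true_eq]
  rw [PySem.List.pyRange_neg_one_eq_reverse]
  have h2 : (1 : Int) + 1 = 2 := by norm_num
  have hj : j - 1 + 1 = j := by ring
  rw [h2, hj]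
  simp [isPr, List.any_eq_not_all_not]

lemma summiaLoop_eq (luku : Int) (lista : List Int) (hs : lista.sum < luku) :
    ∀ (js : List Int) (hj : ∀ j ∈ js, 1 < j) (tulos : Int),
    summiaLoop luku lista js tulos hj hs =
      tulos + (js.map (fun j => if isPr j then summia luku (lista ++ [j]) else 0)).sum := by
  intro js
  induction js with
  | nil =>
    intro hj tulos
    rw [summiaLoop]
    simp
  | cons j rest ih =>
    intro hj tulos
    rw [summiaLoop]
    simp only [jaollinen_eq]
    have hu : lista.foldl (fun acc item => acc ++ [item]) [] = lista := by
      simpa using PySem.List.foldl_append_singleton lista ([] : List Int)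
    rw [hu, ih]
    cases hPr : isPr j
    · simp [hPr]
    · simp [hPr]
      ring

-- A computes gP (P luku) (luku - sum lista)
lemma summia_eq_gP_aux (n : Nat) : ∀ (luku : Int) (lista : List Int),
    (luku - lista.sum).toNat ≤ n → summia luku lista = gP (P luku) (luku - lista.sum) := by
  induction n with
  | zero =>
    intro luku lista hn
    rw [summia]
    split_ifs with h1 h2
    · rw [gP, if_pos (by omega)]
    · rw [gP, if_neg (by omega), h2]
      simp [c_zero]
    · omega
  | succ n ih =>
    intro luku lista hn
    rw [summia]
    split_ifs with h1 h2
    · rw [gP, if_pos (by omega)]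
    · rw [gP, if_neg (by omega), h2]
      simp [c_zero]
    · rw [summiaLoop_eq, zero_add]
      have hstep : (PySem.List.pyRange luku 1 (-1)).map
            (fun j => if isPr j then summia luku (lista ++ [j]) else 0) =
          (PySem.List.pyRange luku 1 (-1)).map
            (fun j => if isPr j then gP (P luku) (luku - lista.sum - j) else 0) := by
        apply List.map_congr_left
        intro j hjm
        have hj2 : 1 < j := (PySem.List.mem_pyRange_neg_one.1 hjm).1
        by_cases hPr : isPr j
        · rw [if_pos hPr, if_pos hPr,
              ih luku (lista ++ [j]) (by rw [List.sum_append]; simp; omega)]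
          congr 1
          rw [List.sum_append]
          simp
          ring
        · rw [if_neg hPr, if_neg hPr]
      rw [hstep, PySem.List.pyRange_neg_one_eq_reverse]
      have h2' : (1 : Int) + 1 = 2 := by norm_num
      rw [h2', List.map_reverse, List.sum_reverse]
      rw [sum_map_ite_zero]
      exact (gP_succ (P luku) (two_le_mem_P luku) (luku - lista.sum) (by omega)).symm

lemma summia_eq_gP (luku : Int) (lista : List Int) :
    summia luku lista = gP (P luku) (luku - lista.sum) := by
  exact summia_eq_gP_aux (luku - lista.sum).toNat luku lista (le_refl _)

-- restricted filters of the prime lists agree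
lemma filter_P_eq (L L' i : Int) (hLL : L ≤ L') (hi : i ≤ L) :
    (P L').filter (fun p => decide (p ≤ i)) = (P L).filter (fun p => decide (p ≤ i)) := by
  unfold P
  rw [List.filter_filter, List.filter_filter]
  by_cases h1 : 1 ≤ L
  · rw [PySem.List.pyRange_one_append 2 (L+1) (L'+1) (by omega) (by omega), List.filter_append]
    have hnil : (PySem.List.pyRange (L+1) (L'+1) 1).filter (fun p => decide (p ≤ i) && isPr p) = [] := by
      apply List.filter_eq_nil_iff.2
      intro p hp
      have := PySem.List.mem_pyRange_one.1 hp
      simp only [Bool.and_eq_true, decide_eq_true_eq]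
      intro hc
      omega
    rw [hnil, List.append_nil]
  · have hnil : ∀ M : Int, (PySem.List.pyRange 2 (M+1) 1).filter (fun p => decide (p ≤ i) && isPr p) = [] := by
      intro M
      apply List.filter_eq_nil_iff.2
      intro p hp
      have := PySem.List.mem_pyRange_one.1 hp
      simp only [Bool.and_eq_true, decide_eq_true_eq]
      intro hc
      omega
    rw [hnil, hnil]

-- dpVec only looks at the filters 'p ≤ i' for 1 ≤ i ≤ n
lemma dpVec_congr (primes₁ primes₂ : List Int) (n : Nat)
    (h : ∀ i : Nat, 1 ≤ i → i ≤ n →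
      primes₁.filter (fun p => decide (p ≤ (i : Int))) =
      primes₂.filter (fun p => decide (p ≤ (i : Int)))) :
    dpVec primes₁ n = dpVec primes₂ n := by
  induction n with
  | zero => rfl
  | succ n ih =>
    have hn : dpVec primes₁ n = dpVec primes₂ n :=
      ih (fun i h1 h2 => h i h1 (by omega))
    have hf := h (n+1) (by omega) (le_refl _)
    rw [dpVec, dpVec, hn]
    push_cast at hf ⊢
    rw [hf]

-- B's foldl builds dpVec
lemma foldl_dpVec (primes : List Int) (n : Nat) :
    (PySem.List.pyRange 1 ((n : Int)+1) 1).foldl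
        (fun dp i => dp ++ [((primes.filter (fun p => decide (p ≤ i))).map
            (fun p => PySem.List.pyGetD dp (i - p) 0)).sum]) [1] = dpVec primes n := by
  induction n with
  | zero =>
    rw [show ((0 : Nat) : Int) + 1 = 1 by norm_num,
        PySem.List.pyRange_one_eq_nil (by norm_num : (1:Int) ≤ 1)]
    rfl
  | succ n ih =>
    rw [show (((n+1 : Nat)) : Int) + 1 = ((n : Int) + 1) + 1 by push_cast; ring,
        PySem.List.pyRange_one_succ_right (show (1:Int) ≤ (n : Int) + 1 by omega),
        List.foldl_append, ih, dpVec]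
    simp only [List.foldl_cons, List.foldl_nil]

-- B computes gP (P luku) (luku - sum lista) as well
lemma summia_alt_eq_gP (luku : Int) (lista : List Int) :
    summia_alt luku lista = gP (P luku) (luku - lista.sum) := by
  dsimp only [summia_alt]
  split_ifs with h1 h2 h3
  · rw [gP, if_pos h1]
  · rw [gP, if_neg (by omega), h2]
    simp [c_zero]
  · -- primes empty: 0 = gP (P luku) r with r > 0
    have hr : 0 < luku - lista.sum := by omega
    obtain ⟨m, hm⟩ : ∃ m : Nat, luku - lista.sum = (m : Int) := ⟨(luku - lista.sum).toNat, by omega⟩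
    have hP : P (min luku (luku - lista.sum)) = [] := h3
    have hcongr : dpVec (P luku) m = dpVec ([] : List Int) m := by
      apply dpVec_congr
      intro i hi1 him
      rw [List.filter_nil]
      have hstep : (P luku).filter (fun p => decide (p ≤ (i : Int))) =
          (P (min luku (luku - lista.sum))).filter (fun p => decide (p ≤ (i : Int))) := by
        by_cases hle : luku ≤ luku - lista.sum
        · rw [min_eq_left hle]
        · rw [min_eq_right (by omega)]
          exact filter_P_eq (luku - lista.sum) luku (i : Int) (by omega) (by omega)
      rw [hstep, hP, List.filter_nil]
    obtain ⟨k, hk⟩ : ∃ k : Nat, m = k + 1 := ⟨m - 1, by omega⟩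
    rw [hm, gP, if_neg (by omega)]
    have hmt : ((m : Int)).toNat = m := by omega
    rw [hmt]
    unfold cDP
    rw [hcongr, hk, show dpVec ([] : List Int) (k+1) = (dpVec ([] : List Int) k) ++ [0] by
      rw [dpVec]; simp]
    rw [List.getD_append_right _ _ _ _ (by rw [length_dpVec])]
    rw [length_dpVec]
    simp
  · -- r > 0, primes nonempty
    have hr : 0 < luku - lista.sum := by omega
    obtain ⟨m, hm⟩ : ∃ m : Nat, luku - lista.sum = (m : Int) := ⟨(luku - lista.sum).toNat, by omega⟩
    have hPB : (PySem.List.pyRange 2 (min luku (luku - lista.sum) + 1) 1).filter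
        (fun p => (PySem.List.pyRange 2 p 1).all (fun d => !(PySem.Int.mod p d == 0)))
        = P (min luku (luku - lista.sum)) := rfl
    rw [hPB, hm, foldl_dpVec (P (min luku ((m : Int)))) m]
    have hcongr : dpVec (P (min luku ((m : Int)))) m = dpVec (P luku) m := by
      apply dpVec_congr
      intro i hi1 him
      by_cases hle : luku ≤ (m : Int)
      · rw [min_eq_left hle]
      · rw [min_eq_right (by omega)]
        exact (filter_P_eq ((m : Int)) luku (i : Int) (by omega) (by exact_mod_cast him)).symm
    rw [hcongr, PySem.List.pyGetD_natCast]
    rw [gP, if_neg (by omega)]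
    have : ((m : Int)).toNat = m := by omega
    rw [this]
    rfl

-- ===== VERDICT (by name: the statement is the Claim_ definition above) =====
theorem summia_spec : Claim_equal_summia := by
  intro luku lista _ _
  unfold Spec_summia
  rw [summia_eq_gP, summia_alt_eq_gP]
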